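-- pv_equiv track=rewrite | github.com/DoctorBomb/Qarik-Team-Bear | Clean_Data/Amortization_schedule.py | new_min
-- ===== SOURCE A (Python) =====
-- def new_min(list):
--     new_list = []
--     for a in list:
--         if a != -1:
--             new_list.append(a)
--     if new_list == []:
--         return -1
--     else:
--         return min(new_list)
-- ===== SOURCE B (Python) =====
-- def new_min(list):
--     best = None
--     for a in list:
--         if a != -1:
--             if best is None or a < best:
--                 best = a
--     return -1 if best is None else best
-- ===== Notes on version B (the rewrite author's own statement) =====
-- stated objective: simpler
-- what changed: Replaces the build-a-filtered-list-then-min(two passes, extra list) with a single streaming pass keeping an Option-style running minimum; no intermediate list is allocated.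
import Mathlib
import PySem

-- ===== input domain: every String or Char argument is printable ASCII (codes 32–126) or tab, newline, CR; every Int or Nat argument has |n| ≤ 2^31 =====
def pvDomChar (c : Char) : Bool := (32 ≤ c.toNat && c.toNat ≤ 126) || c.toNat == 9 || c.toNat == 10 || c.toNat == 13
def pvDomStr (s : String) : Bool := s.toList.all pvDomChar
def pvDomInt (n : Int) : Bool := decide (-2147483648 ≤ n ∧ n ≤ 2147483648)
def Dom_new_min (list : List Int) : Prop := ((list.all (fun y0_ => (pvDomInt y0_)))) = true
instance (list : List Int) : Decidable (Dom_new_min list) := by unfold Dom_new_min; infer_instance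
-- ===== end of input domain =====

-- B replaces A's filter-into-a-new-list-then-min with a single streaming pass keeping an optional running minimum (same cost, simpler).


-- ===== PORT A =====
def new_min (list : List Int) : Int :=
  let new_list := list.foldl (fun acc a => if a ≠ -1 then acc ++ [a] else acc) []
  if new_list = [] then -1
  else
    match PySem.List.min? new_list (fun x => x) with
    | some m => m
    | none => -1   -- unreachable: new_list ≠ []

-- ===== PORT B =====
def new_min_alt (list : List Int) : Int :=
  let best := list.foldl
    (fun best a =>
      if a ≠ -1 then
        match best with
        | none => some a
        | some b => if a < b then some a else some b
      else best) (none : Option Int)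
  match best with
  | none => -1
  | some b => b

-- ===== PRECONDITION & SPEC =====
def Spec_new_min (list : List Int) (out : Int) : Prop := out = new_min_alt list
instance (list : List Int) (out : Int) : Decidable (Spec_new_min list out) := by unfold Spec_new_min; infer_instance

-- ===== CLAIM (what is proved, stated in full; the proofs are below) =====
def Claim_equal_new_min : Prop := ∀ (list : List Int), Dom_new_min list → Spec_new_min list (new_min list)

-- ===== LEMMAS AND PROOFS =====

/-- The running minimum of A's accumulator list: `none` iff empty, else its minimum. -/
def minOpt : List Int → Option Int
  | [] => none
  | x :: t => some (t.foldl min x)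

theorem minOpt_append (acc : List Int) (a : Int) :
    minOpt (acc ++ [a]) =
      some (match minOpt acc with
            | none => a
            | some b => if a < b then a else b) := by
  cases acc with
  | nil => simp [minOpt]
  | cons x t =>
      simp only [minOpt, List.cons_append, List.foldl_append, List.foldl]
      congr 1
      rcases lt_trichotomy a (t.foldl min x) with h | h | h <;>
        simp [h, le_of_lt]

theorem fold_rel (l : List Int) (acc : List Int) :
    minOpt (l.foldl (fun acc a => if a ≠ -1 then acc ++ [a] else acc) acc) =
      l.foldl
        (fun best a =>
          if a ≠ -1 then
            match best with
            | none => some a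
            | some b => if a < b then some a else some b
          else best) (minOpt acc) := by
  induction l generalizing acc with
  | nil => rfl
  | cons a l ih =>
      simp only [List.foldl]
      by_cases h : a = -1
      · rw [if_neg (by simp [h]), if_neg (by simp [h])]
        exact ih acc
      · rw [if_pos h, if_pos h, ih (acc ++ [a]), minOpt_append]
        cases minOpt acc with
        | none => rfl
        | some b => by_cases hb : a < b <;> simp [hb]

-- ===== VERDICT (by name: the statement is the Claim_ definition above) =====
theorem new_min_spec : Claim_equal_new_min := by
  intro l _
  unfold Spec_new_min new_min new_min_alt
  simp only []
  have hrel := fold_rel l []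
  simp only [minOpt] at hrel
  rw [← hrel]
  cases h : l.foldl (fun acc a => if a ≠ -1 then acc ++ [a] else acc) [] with
  | nil => simp
  | cons x t => simp [PySem.List.min?_id_cons]
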